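-- pv_equiv track=rewrite | github.com/elizzer/MLT-MINI-PRO | dataset/split_span.py | break_list_on_jump
-- ===== SOURCE A (Python) =====
-- def break_list_on_jump(input_list):
--     result = []
--
--     if not input_list:
--         return result
--
--     current_start = input_list[0]
--
--     for i in range(1, len(input_list)):
--         if input_list[i] - input_list[i - 1] > 1:
--             result.append((current_start, input_list[i - 1]))
--             current_start = input_list[i]
--
--     result.append((current_start, input_list[-1]))
--     return result
-- ===== SOURCE B (Python) =====
-- def break_list_on_jump(input_list):
--     if not input_list:
--         return []
--     n = len(input_list)
--     # stage 1: the cut indices (boundaries of maximal runs)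
--     bounds = [0] + [i for i in range(1, n) if input_list[i] - input_list[i - 1] > 1] + [n]
--     # stage 2: one span per consecutive boundary pair
--     return [(input_list[lo], input_list[hi - 1]) for lo, hi in zip(bounds, bounds[1:])]
-- ===== Notes on version B (the rewrite author's own statement) =====
-- stated objective: alternative
-- what changed: B is staged: a first pass materialises the list of boundary indices (zero, each index where the value gap exceeds 1, and the length), then a second pass zips consecutive boundary pairs and indexes back into the list to emit one span per pair; A instead does a single pass carrying a pending current_start and appending spans as it goes.
import Mathlib
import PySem

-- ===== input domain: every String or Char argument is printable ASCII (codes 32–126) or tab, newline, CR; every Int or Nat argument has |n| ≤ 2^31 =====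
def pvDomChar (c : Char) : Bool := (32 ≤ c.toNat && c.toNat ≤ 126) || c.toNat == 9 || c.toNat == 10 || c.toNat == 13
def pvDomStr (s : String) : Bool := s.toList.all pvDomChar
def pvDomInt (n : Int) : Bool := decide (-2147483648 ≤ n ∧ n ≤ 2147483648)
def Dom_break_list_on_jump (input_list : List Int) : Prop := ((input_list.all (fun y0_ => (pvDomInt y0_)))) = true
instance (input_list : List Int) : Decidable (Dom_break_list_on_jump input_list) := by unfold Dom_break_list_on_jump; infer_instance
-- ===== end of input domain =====

-- B replaces A's single pass with a pending current_start by two staged passes: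
-- first collect the boundary indices (zero, jump indices, length), then zip consecutive boundaries
-- into spans by indexing back into the list (alternative decomposition, same cost).


-- ===== PORT A =====
-- loop body of A's 'for i in range(1, len(input_list))', state = (result, current_start)
def bljStep (l : List Int) (st : List (Int × Int) × Int) (i : Int) : List (Int × Int) × Int :=
  if PySem.List.pyGetD l i 0 - PySem.List.pyGetD l (i - 1) 0 > 1 then
    (st.1 ++ [(st.2, PySem.List.pyGetD l (i - 1) 0)], PySem.List.pyGetD l i 0)
  else st

def break_list_on_jump (input_list : List Int) : List (Int × Int) :=
  match input_list with
  | [] => []                           -- 'if not input_list: return result'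
  | x :: _ =>                          -- current_start = input_list[0]
    let st := (PySem.List.pyRange 1 (input_list.length : Int) 1).foldl (bljStep input_list) ([], x)
    st.1 ++ [(st.2, PySem.List.pyGetD input_list (-1) 0)]   -- result.append((current_start, input_list[-1]))

-- ===== PORT B =====
def break_list_on_jump_alt (input_list : List Int) : List (Int × Int) :=
  match input_list with
  | [] => []                           -- 'if not input_list: return []'
  | _ :: _ =>
    let n : Int := input_list.length
    -- bounds = [0] + [i for i in range(1, n) if input_list[i] - input_list[i-1] > 1] + [n]
    let bounds : List Int :=
      0 :: ((PySem.List.pyRange 1 n 1).filter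
        (fun i => decide (PySem.List.pyGetD input_list i 0 - PySem.List.pyGetD input_list (i - 1) 0 > 1)) ++ [n])
    -- [(input_list[lo], input_list[hi-1]) for lo, hi in zip(bounds, bounds[1:])]  (bounds[1:] = drop 1, exact)
    (bounds.zip (bounds.drop 1)).map
      (fun p => (PySem.List.pyGetD input_list p.1 0, PySem.List.pyGetD input_list (p.2 - 1) 0))

-- ===== PRECONDITION & SPEC =====
def Spec_break_list_on_jump (input_list : List Int) (out : List (Int × Int)) : Prop := out = break_list_on_jump_alt input_list
instance (input_list : List Int) (out : List (Int × Int)) : Decidable (Spec_break_list_on_jump input_list out) := by unfold Spec_break_list_on_jump; infer_instance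

-- ===== CLAIM (what is proved, stated in full; the proofs are below) =====
def Claim_equal_break_list_on_jump : Prop := ∀ (input_list : List Int), Dom_break_list_on_jump input_list → Spec_break_list_on_jump input_list (break_list_on_jump input_list)

-- ===== LEMMAS AND PROOFS =====

-- spans determined by a start value cs and the remaining jump indices js (ends at l[-1])
def bljQ (l : List Int) : Int → List Int → List (Int × Int)
  | cs, [] => [(cs, PySem.List.pyGetD l (-1) 0)]
  | cs, j :: js => (cs, PySem.List.pyGetD l (j - 1) 0) :: bljQ l (PySem.List.pyGetD l j 0) js

lemma bljQ_append (l : List Int) (res : List (Int × Int)) (p : Int × Int) (cs : Int) (js : List Int) :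
    (res ++ [p]) ++ bljQ l cs js = res ++ (p :: bljQ l cs js) := by simp

-- A's fold over the tail of the range, with the final append, equals bljQ over the filtered jumps
lemma blj_fold (l : List Int) (m : Nat) : ∀ (k : Int) (res : List (Int × Int)) (cs : Int),
    1 ≤ k → k + m = (l.length : Int) →
    (let st := (PySem.List.pyRange k (l.length : Int) 1).foldl (bljStep l) (res, cs)
     st.1 ++ [(st.2, PySem.List.pyGetD l (-1) 0)])
    = res ++ bljQ l cs ((PySem.List.pyRange k (l.length : Int) 1).filter
        (fun i => decide (PySem.List.pyGetD l i 0 - PySem.List.pyGetD l (i - 1) 0 > 1))) := by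
  induction m with
  | zero =>
    intro k res cs hk hkm
    rw [PySem.List.pyRange_one_eq_nil (by omega)]
    simp [bljQ]
  | succ m ih =>
    intro k res cs hk hkm
    rw [PySem.List.pyRange_one_cons (by omega)]
    simp only [List.foldl_cons, List.filter_cons]
    by_cases h : PySem.List.pyGetD l k 0 - PySem.List.pyGetD l (k - 1) 0 > 1
    · rw [if_pos (by exact decide_eq_true h)]
      have hstep : bljStep l (res, cs) k
          = (res ++ [(cs, PySem.List.pyGetD l (k - 1) 0)], PySem.List.pyGetD l k 0) := by
        unfold bljStep; rw [if_pos h]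
      rw [hstep, ih (k + 1) _ _ (by omega) (by omega)]
      rw [bljQ_append]
      rfl
    · rw [if_neg (by simpa using h)]
      have hstep : bljStep l (res, cs) k = (res, cs) := by
        unfold bljStep; rw [if_neg h]
      rw [hstep, ih (k + 1) _ _ (by omega) (by omega)]

-- B's zip-of-consecutive-boundaries equals bljQ, provided l[n0-1] = l[-1]
lemma blj_zip (l : List Int) (n0 : Int)
    (h : PySem.List.pyGetD l (n0 - 1) 0 = PySem.List.pyGetD l (-1) 0) :
    ∀ (bs : List Int) (lo : Int),
    (((lo :: (bs ++ [n0])).zip ((lo :: (bs ++ [n0])).drop 1)).map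
      (fun p => (PySem.List.pyGetD l p.1 0, PySem.List.pyGetD l (p.2 - 1) 0)))
    = bljQ l (PySem.List.pyGetD l lo 0) bs := by
  intro bs
  induction bs with
  | nil => intro lo; simp [bljQ, h]
  | cons j js ih =>
    intro lo
    have := ih j
    simp only [List.cons_append, List.drop_one, List.tail_cons, List.zip_cons_cons,
      List.map_cons, bljQ] at this ⊢
    rw [this]

-- ===== VERDICT (by name: the statement is the Claim_ definition above) =====
theorem break_list_on_jump_spec : Claim_equal_break_list_on_jump := by
  intro l _
  unfold Spec_break_list_on_jump break_list_on_jump break_list_on_jump_alt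
  cases l with
  | nil => rfl
  | cons x rest =>
    have hne : (x :: rest) ≠ ([] : List Int) := by simp
    have hlast : PySem.List.pyGetD (x :: rest) (((x :: rest).length : Int) - 1) 0
        = PySem.List.pyGetD (x :: rest) (-1) 0 := by
      have h1 : (((x :: rest).length : Int) - 1) = (((x :: rest).length - 1 : Nat) : Int) := by
        simp
      rw [h1, PySem.List.pyGetD_natCast, PySem.List.pyGetD_neg_one _ _ hne]
      rw [List.getD_eq_getElem?_getD, List.getElem?_eq_getElem (by simp), List.getLast_eq_getElem]
      simp
    have hzip := blj_zip (x :: rest) ((x :: rest).length : Int) hlast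
      (((PySem.List.pyRange 1 ((x :: rest).length : Int) 1).filter
        (fun i => decide (PySem.List.pyGetD (x :: rest) i 0 - PySem.List.pyGetD (x :: rest) (i - 1) 0 > 1)))) 0
    have hfold := blj_fold (x :: rest) rest.length 1 [] x (by omega) (by simp; omega)
    have h0 : PySem.List.pyGetD (x :: rest) 0 0 = x := PySem.List.pyGetD_zero_cons _ _ _
    simp only [h0] at hzip
    simp only [List.nil_append] at hfold
    dsimp only
    rw [hfold, ← hzip]
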